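-- pv_equiv track=rewrite | github.com/SaintAngeLs/teaching_r | test/testing_functions/spec1_test.py | get_month
-- ===== SOURCE A (Python) =====
-- def get_month(day):
--     months = {
--         1: "January",
--         2: "February",
--         3: "March",
--         4: "April",
--         5: "May",
--         6: "June",
--         7: "July",
--         8: "August",
--         9: "September",
--         10: "October",
--         11: "November",
--         12: "December"
--     }
--
--     if 1 <= day <= 365:
--         cumulative_days = [0, 31, 60, 91, 121, 152, 182, 213, 244, 274, 305, 335]
--         for month, cumulative_day in enumerate(cumulative_days, start=0):
--             if day <= cumulative_day:
--                 return months[month]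
--         return months[12]  # December (day 365)
--     else:
--         return "Invalid day."
-- ===== SOURCE B (Python) =====
-- def get_month(day):
--     if not (1 <= day <= 365):
--         return "Invalid day."
--     names = ["January", "February", "March", "April", "May", "June",
--              "July", "August", "September", "October", "November", "December"]
--     cum = [0, 31, 60, 91, 121, 152, 182, 213, 244, 274, 305, 335]
--     # binary search (bisect_left): smallest lo with cum[lo] >= day, 12 if none
--     lo, hi = 0, 12
--     while lo < hi:
--         mid = (lo + hi) // 2
--         if cum[mid] < day:
--             lo = mid + 1
--         else:
--             hi = mid
--     return names[lo - 1]
-- ===== Notes on version B (the rewrite author's own statement) =====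
-- stated objective: alternative
-- what changed: Replaces the dict plus linear scan over enumerated cumulative thresholds with a binary search (bisect_left) over the sorted threshold table, indexing a plain month-name list.
import Mathlib
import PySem

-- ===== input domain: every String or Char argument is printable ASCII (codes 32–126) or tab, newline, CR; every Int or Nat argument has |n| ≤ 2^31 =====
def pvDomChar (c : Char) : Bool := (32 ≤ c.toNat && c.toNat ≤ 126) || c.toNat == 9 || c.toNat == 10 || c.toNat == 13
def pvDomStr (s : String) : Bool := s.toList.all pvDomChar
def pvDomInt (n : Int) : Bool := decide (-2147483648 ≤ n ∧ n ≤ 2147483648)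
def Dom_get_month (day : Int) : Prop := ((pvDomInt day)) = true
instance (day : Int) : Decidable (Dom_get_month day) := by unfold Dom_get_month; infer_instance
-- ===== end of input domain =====

-- B replaces A's dict + linear scan with a binary search over the threshold table (alternative; same behaviour).

-- ===== PORT A =====
def pvMonths : PySem.Dict Int String := PySem.Dict.ofList
  [(1, "January"), (2, "February"), (3, "March"), (4, "April"), (5, "May"), (6, "June"),
   (7, "July"), (8, "August"), (9, "September"), (10, "October"), (11, "November"), (12, "December")]

-- A's for-loop over enumerate(cumulative_days, start=0) with early return
def pvLoopA (day : Int) : List (Int × Int) → String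
  | [] => pvMonths.getD 12 ""          -- return months[12]  (key always present)
  | (month, c) :: rest => if day ≤ c then pvMonths.getD month "" else pvLoopA day rest

def get_month (day : Int) : String :=
  if 1 ≤ day ∧ day ≤ 365 then
    pvLoopA day (PySem.List.enumerate [(0 : Int), 31, 60, 91, 121, 152, 182, 213, 244, 274, 305, 335] 0)
  else "Invalid day."

-- ===== PORT B =====
-- B's while-loop binary search; fuel bounds the iterations (hi - lo shrinks, 12 suffices; 16 for safety)
def pvBisect (cum : List Int) (day : Int) : Nat → Nat → Nat → Nat
  | 0, lo, _ => lo
  | fuel + 1, lo, hi =>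
    if lo < hi then
      let mid := (lo + hi) / 2
      if cum.getD mid 0 < day then pvBisect cum day fuel (mid + 1) hi
      else pvBisect cum day fuel lo mid
    else lo

def get_month_alt (day : Int) : String :=
  if 1 ≤ day ∧ day ≤ 365 then
    let names := ["January", "February", "March", "April", "May", "June",
                  "July", "August", "September", "October", "November", "December"]
    let cum := [(0 : Int), 31, 60, 91, 121, 152, 182, 213, 244, 274, 305, 335]
    let lo := pvBisect cum day 16 0 12
    names.getD (lo - 1) ""
  else "Invalid day."

-- ===== PRECONDITION & SPEC =====
def Spec_get_month (day : Int) (out : String) : Prop := out = get_month_alt day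
instance (day : Int) (out : String) : Decidable (Spec_get_month day out) := by unfold Spec_get_month; infer_instance

-- ===== CLAIM (what is proved, stated in full; the proofs are below) =====
def Claim_equal_get_month : Prop := ∀ (day : Int), Dom_get_month day → Spec_get_month day (get_month day)

-- ===== LEMMAS AND PROOFS =====
theorem get_month_eq_of_bounds (day : Int) (h1 : 1 ≤ day) (h2 : day ≤ 365) :
    get_month day = get_month_alt day := by
  interval_cases day <;> decide

-- ===== VERDICT (by name: the statement is the Claim_ definition above) =====
theorem get_month_spec : Claim_equal_get_month := by
  intro day _
  unfold Spec_get_month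
  by_cases h : 1 ≤ day ∧ day ≤ 365
  · exact (get_month_eq_of_bounds day h.1 h.2).symm ▸ rfl
  · simp [get_month, get_month_alt, h]
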